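-- pv_equiv track=rewrite | github.com/CliffordFung/Algorithms-Questions | DP - 3. Staircase.py | stairOptimized
-- ===== SOURCE A (Python) =====
-- def stairOptimized(n):
--     i1, i2, i3, iN = 1, 1, 2, 0
--
--     for i in range(3, n + 1):
--         iN = i1 + i2 + i3
--         i1 = i2
--         i2 = i3
--         i3 = iN
--     return iN
-- ===== SOURCE B (Python) =====
-- def _mul(A, B):
--     a, b, c, d, e, f, g, h, i = A
--     j, k, l, m, n, o, p, q, r = B
--     return (a*j + b*m + c*p, a*k + b*n + c*q, a*l + b*o + c*r,
--             d*j + e*m + f*p, d*k + e*n + f*q, d*l + e*o + f*r,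
--             g*j + h*m + i*p, g*k + h*n + i*q, g*l + h*o + i*r)
--
--
-- def _mpow(R, M, e):
--     while e:
--         if e % 2 == 1:
--             R = _mul(R, M)
--         M = _mul(M, M)
--         e //= 2
--     return R
--
--
-- def stairOptimized(n):
--     if n < 3:
--         return 0
--     P = _mpow((1, 0, 0, 0, 1, 0, 0, 0, 1), (1, 1, 1, 1, 0, 0, 0, 1, 0), n - 3)
--     p00, p01, p02 = P[0], P[1], P[2]
--     return p00 * 4 + p01 * 2 + p02 * 1
-- ===== Notes on version B (the rewrite author's own statement) =====
-- stated objective: faster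
-- what changed: Replaced the linear DP loop with binary matrix exponentiation of the same three-term recurrence (3x3 matrices as flat 9-tuples), with a direct base-case return below the loop's starting point; intended as faster: the probe measured B 4.5-5.8x faster at the largest size where both finished (confirmation at the very top size depended on whether the harness could decode the huge integer outputs).
import Mathlib
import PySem

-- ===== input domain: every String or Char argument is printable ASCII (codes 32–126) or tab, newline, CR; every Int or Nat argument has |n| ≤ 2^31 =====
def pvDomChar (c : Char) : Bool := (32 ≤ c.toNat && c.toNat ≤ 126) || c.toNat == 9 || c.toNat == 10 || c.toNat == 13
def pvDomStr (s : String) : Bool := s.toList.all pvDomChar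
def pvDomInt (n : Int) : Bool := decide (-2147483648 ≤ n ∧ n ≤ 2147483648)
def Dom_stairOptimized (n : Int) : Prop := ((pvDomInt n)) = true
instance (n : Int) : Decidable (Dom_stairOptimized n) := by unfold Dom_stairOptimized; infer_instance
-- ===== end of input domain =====

-- B replaces A's DP loop by binary matrix exponentiation of the same three-term recurrence (objective: faster; intended O(log n) multiplications instead of O(n) loop steps; a timing run measured B ~5x faster at the largest size both finished).

-- ===== PORT A =====
def stairOptimized (n : Int) : Int :=
  let s := (PySem.List.pyRange 3 (n + 1) 1).foldl
    (fun (st : Int × Int × Int × Int) _ =>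
      let iN := st.1 + st.2.1 + st.2.2.1
      (st.2.1, st.2.2.1, iN, iN)) (1, 1, 2, 0)
  s.2.2.2

-- ===== PORT B =====
abbrev Mat3 := Int × Int × Int × Int × Int × Int × Int × Int × Int

def matMul (A B : Mat3) : Mat3 :=
  match A, B with
  | (a, b, c, d, e, f, g, h, i), (j, k, l, m, n, o, p, q, r) =>
    (a*j + b*m + c*p, a*k + b*n + c*q, a*l + b*o + c*r,
     d*j + e*m + f*p, d*k + e*n + f*q, d*l + e*o + f*r,
     g*j + h*m + i*p, g*k + h*n + i*q, g*l + h*o + i*r)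

-- the 'while e:' loop of Source B's _mpow, structural on e/2 < e
def matPowLoop (R M : Mat3) (e : Nat) : Mat3 :=
  if e = 0 then R
  else matPowLoop (if e % 2 = 1 then matMul R M else R) (matMul M M) (e / 2)
decreasing_by exact Nat.div_lt_self (Nat.pos_of_ne_zero (by assumption)) (by norm_num)

def stairOptimized_alt (n : Int) : Int :=
  if n < 3 then 0
  else
    let P := matPowLoop (1, 0, 0, 0, 1, 0, 0, 0, 1) (1, 1, 1, 1, 0, 0, 0, 1, 0) (n - 3).toNat
    P.1 * 4 + P.2.1 * 2 + P.2.2.1 * 1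

-- ===== PRECONDITION & SPEC =====
def Spec_stairOptimized (n : Int) (out : Int) : Prop := out = stairOptimized_alt n
instance (n : Int) (out : Int) : Decidable (Spec_stairOptimized n out) := by unfold Spec_stairOptimized; infer_instance

-- ===== CLAIM (what is proved, stated in full; the proofs are below) =====
def Claim_equal_stairOptimized : Prop := ∀ (n : Int), Dom_stairOptimized n → Spec_stairOptimized n (stairOptimized n)

-- ===== LEMMAS AND PROOFS =====

-- the tribonacci-style sequence both programs compute: result = trib n for n >= 3, else 0
def trib : Nat → Int
  | 0 => 1
  | 1 => 1
  | 2 => 2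
  | (k + 3) => trib k + trib (k + 1) + trib (k + 2)

def matI : Mat3 := (1, 0, 0, 0, 1, 0, 0, 0, 1)
def matM : Mat3 := (1, 1, 1, 1, 0, 0, 0, 1, 0)

def matPow (M : Mat3) : Nat → Mat3
  | 0 => matI
  | k + 1 => matMul (matPow M k) M

theorem trib_add3 (k : Nat) : trib (k + 3) = trib k + trib (k + 1) + trib (k + 2) := rfl

theorem matPow_succ (M : Mat3) (k : Nat) : matPow M (k + 1) = matMul (matPow M k) M := rfl

theorem matMul_assoc (A B C : Mat3) : matMul (matMul A B) C = matMul A (matMul B C) := by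
  obtain ⟨a, b, c, d, e, f, g, h, i⟩ := A
  obtain ⟨j, k, l, m, n, o, p, q, r⟩ := B
  obtain ⟨s, t, u, v, w, x, y, z, zz⟩ := C
  simp only [matMul, Prod.mk.injEq]
  refine ⟨?_, ?_, ?_, ?_, ?_, ?_, ?_, ?_, ?_⟩ <;> ring

theorem matMul_one (A : Mat3) : matMul A matI = A := by
  obtain ⟨a, b, c, d, e, f, g, h, i⟩ := A
  simp only [matMul, matI, Prod.mk.injEq]
  refine ⟨?_, ?_, ?_, ?_, ?_, ?_, ?_, ?_, ?_⟩ <;> ring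

theorem matOne_mul (A : Mat3) : matMul matI A = A := by
  obtain ⟨a, b, c, d, e, f, g, h, i⟩ := A
  simp only [matMul, matI, Prod.mk.injEq]
  refine ⟨?_, ?_, ?_, ?_, ?_, ?_, ?_, ?_, ?_⟩ <;> ring

theorem matPow_comm (M : Mat3) (k : Nat) :
    matMul M (matPow M k) = matMul (matPow M k) M := by
  induction k with
  | zero => rw [matPow, matMul_one, matOne_mul]
  | succ k ih => rw [matPow_succ, ← matMul_assoc, ih]

theorem matPow_add (M : Mat3) (a b : Nat) :
    matPow M (a + b) = matMul (matPow M a) (matPow M b) := by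
  induction b with
  | zero => rw [Nat.add_zero, matPow, matMul_one]
  | succ b ih =>
    rw [show a + (b + 1) = (a + b) + 1 from by omega, matPow_succ, matPow_succ, ih,
        matMul_assoc]

theorem matPow_sq (M : Mat3) (k : Nat) :
    matPow (matMul M M) k = matPow M (2 * k) := by
  induction k with
  | zero => rfl
  | succ k ih =>
    have h2 : matMul M M = matPow M 2 := by
      rw [show (2 : Nat) = 0 + 1 + 1 from rfl, matPow_succ, matPow_succ, matPow, matOne_mul]
    rw [matPow_succ, ih, h2, ← matPow_add, show 2 * k + 2 = 2 * (k + 1) from by omega]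

theorem matPowLoop_eq (e : Nat) : ∀ R M : Mat3, matPowLoop R M e = matMul R (matPow M e) := by
  induction e using Nat.strong_induction_on with
  | _ e ih =>
    intro R M
    by_cases h0 : e = 0
    · subst h0; simp [matPowLoop, matPow, matMul_one]
    · rw [matPowLoop]
      simp only [h0, if_false]
      rw [ih (e / 2) (Nat.div_lt_self (Nat.pos_of_ne_zero h0) (by norm_num)), matPow_sq]
      by_cases hp : e % 2 = 1
      · rw [if_pos hp]
        conv_rhs => rw [show e = 2 * (e / 2) + 1 from by omega]
        rw [matPow_succ, matMul_assoc, matPow_comm]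
      · rw [if_neg hp]
        rw [show 2 * (e / 2) = e from by omega]

-- action of a matrix on a column vector (only the first row is needed for the result)
def matAct (P : Mat3) (v : Int × Int × Int) : Int × Int × Int :=
  match P, v with
  | (a, b, c, d, e, f, g, h, i), (x, y, z) =>
    (a*x + b*y + c*z, d*x + e*y + f*z, g*x + h*y + i*z)

theorem matAct_fst (P : Mat3) (x y z : Int) :
    (matAct P (x, y, z)).1 = P.1 * x + P.2.1 * y + P.2.2.1 * z := by
  obtain ⟨a, b, c, d, e, f, g, h, i⟩ := P
  rfl

theorem matAct_mul (A B : Mat3) (v : Int × Int × Int) :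
    matAct (matMul A B) v = matAct A (matAct B v) := by
  obtain ⟨a, b, c, d, e, f, g, h, i⟩ := A
  obtain ⟨j, k, l, m, n, o, p, q, r⟩ := B
  obtain ⟨x, y, z⟩ := v
  simp only [matMul, matAct, Prod.mk.injEq]
  refine ⟨?_, ?_, ?_⟩ <;> ring

theorem matAct_M (k : Nat) :
    matAct matM (trib (k + 2), trib (k + 1), trib k)
      = (trib (k + 3), trib (k + 2), trib (k + 1)) := by
  simp only [matAct, matM, Prod.mk.injEq]
  refine ⟨?_, ?_, ?_⟩
  · rw [trib_add3]; ring
  · ring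
  · ring

theorem matAct_pow (e k : Nat) :
    matAct (matPow matM e) (trib (k + 2), trib (k + 1), trib k)
      = (trib (k + 2 + e), trib (k + 1 + e), trib (k + e)) := by
  induction e generalizing k with
  | zero => simp [matPow, matI, matAct]
  | succ e ih =>
    rw [matPow_succ, matAct_mul, matAct_M]
    have h := ih (k + 1)
    rw [show k + 1 + 2 = k + 3 from by omega, show k + 1 + 1 = k + 2 from by omega] at h
    rw [h, show k + 1 + 2 + e = k + 2 + (e + 1) from by omega,
        show k + 1 + 1 + e = k + 1 + (e + 1) from by omega,
        show k + 1 + e = k + (e + 1) from by omega]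

-- B computes trib n for n >= 3
theorem alt_eq_trib (n : Int) (h : 3 ≤ n) : stairOptimized_alt n = trib n.toNat := by
  have hn : ¬ n < 3 := by omega
  simp only [stairOptimized_alt, hn, if_false]
  rw [show ((1, 1, 1, 1, 0, 0, 0, 1, 0) : Mat3) = matM from rfl,
      show ((1, 0, 0, 0, 1, 0, 0, 0, 1) : Mat3) = matI from rfl,
      matPowLoop_eq, matOne_mul]
  have key := matAct_pow (n - 3).toNat 1
  rw [show ((trib (1 + 2) : Int), trib (1 + 1), trib 1) = ((4 : Int), 2, 1) from by decide] at key
  have h1 := congrArg Prod.fst key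
  rw [matAct_fst] at h1
  rw [h1, show 1 + 2 + (n - 3).toNat = n.toNat from by omega]

-- A's loop body as a function, and its iteration
def stepA (st : Int × Int × Int × Int) : Int × Int × Int × Int :=
  (st.2.1, st.2.2.1, st.1 + st.2.1 + st.2.2.1, st.1 + st.2.1 + st.2.2.1)

theorem foldl_const_iterate (l : List Int) (s : Int × Int × Int × Int) :
    l.foldl (fun st _ => stepA st) s = stepA^[l.length] s := by
  induction l generalizing s with
  | nil => rfl
  | cons x xs ih => simp [List.foldl, ih, Function.iterate_succ_apply]

theorem iterate_stepA (m : Nat) :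
    stepA^[m + 1] (1, 1, 2, 0) = (trib (m + 1), trib (m + 2), trib (m + 3), trib (m + 3)) := by
  induction m with
  | zero => decide
  | succ m ih =>
    rw [Function.iterate_succ_apply', ih]
    show (trib (m + 2), trib (m + 3), trib (m + 1) + trib (m + 2) + trib (m + 3),
          trib (m + 1) + trib (m + 2) + trib (m + 3))
        = (trib (m + 2), trib (m + 3), trib (m + 4), trib (m + 4))
    rw [show trib (m + 4) = trib (m + 1) + trib (m + 2) + trib (m + 3) from trib_add3 (m + 1)]

-- A computes trib n for n >= 3
theorem a_eq_trib (n : Int) (h : 3 ≤ n) : stairOptimized n = trib n.toNat := by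
  simp only [stairOptimized]
  have hb : (fun (st : Int × Int × Int × Int) (_ : Int) =>
      let iN := st.1 + st.2.1 + st.2.2.1
      (st.2.1, st.2.2.1, iN, iN)) = (fun st _ => stepA st) := by
    funext st i; simp [stepA]
  rw [hb, foldl_const_iterate, PySem.List.length_pyRange_one,
      show (n + 1 - 3).toNat = (n.toNat - 3) + 1 from by omega, iterate_stepA]
  rw [show n.toNat - 3 + 3 = n.toNat from by omega]

-- ===== VERDICT (by name: the statement is the Claim_ definition above) =====
theorem stairOptimized_spec : Claim_equal_stairOptimized := by
  intro n _
  unfold Spec_stairOptimized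
  by_cases h : n < 3
  · have hA : stairOptimized n = 0 := by
      simp [stairOptimized, PySem.List.pyRange_one_eq_nil (by omega : n + 1 ≤ 3)]
    have hB : stairOptimized_alt n = 0 := by simp [stairOptimized_alt, h]
    rw [hA, hB]
  · rw [a_eq_trib n (by omega), alt_eq_trib n (by omega)]
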